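-- pv_equiv track=rewrite | github.com/hellosandeeptiwari/Sharepoint-AgenticRAG | sharepoint-ai-agent/sharepoint_ai_agent.py | pick_fallback_pages
-- ===== SOURCE A (Python) =====
-- def pick_fallback_pages(cites, pad=1, max_pages=8):
--     pages = sorted({c["page"] for c in cites if c.get("page")})
--     padded = []
--     for p in pages:
--         for q in range(max(1, p-pad), p+pad+1):
--             padded.append(q)
--     uniq = []
--     for p in padded:
--         if p not in uniq:
--             uniq.append(p)
--         if len(uniq) >= max_pages:
--             break
--     return uniq or [1]
-- ===== SOURCE B (Python) =====
-- def pick_fallback_pages(cites, pad=1, max_pages=8):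
--     pages = sorted({c["page"] for c in cites if c.get("page")})
--     # merge the clamped padding windows into disjoint, non-adjacent intervals
--     intervals = []
--     for p in pages:
--         lo, hi = max(1, p - pad), p + pad
--         if hi < lo:
--             continue
--         if intervals and lo <= intervals[-1][1] + 1:
--             intervals[-1] = (intervals[-1][0], max(intervals[-1][1], hi))
--         else:
--             intervals.append((lo, hi))
--     # emit pages interval by interval until the cap is reached
--     out = []
--     for lo, hi in intervals:
--         take = min(hi - lo + 1, max_pages - len(out))
--         out.extend(range(lo, lo + take))
--         if len(out) >= max_pages:
--             break
--     return out or [1]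
-- ===== Notes on version B (the rewrite author's own statement) =====
-- stated objective: alternative
-- what changed: Instead of materialising every padded page and scanning the list with a capped order-preserving dedup, B merges the clamped padding windows of the sorted distinct pages into disjoint non-adjacent intervals (classic interval merging) and then enumerates whole intervals until the cap, so no per-page dedup or membership test ever runs.
-- outside the precondition, e.g. on pick_fallback_pages([{'page': 5}], 0, 0): A returns [5], B returns [1]
import Mathlib
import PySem

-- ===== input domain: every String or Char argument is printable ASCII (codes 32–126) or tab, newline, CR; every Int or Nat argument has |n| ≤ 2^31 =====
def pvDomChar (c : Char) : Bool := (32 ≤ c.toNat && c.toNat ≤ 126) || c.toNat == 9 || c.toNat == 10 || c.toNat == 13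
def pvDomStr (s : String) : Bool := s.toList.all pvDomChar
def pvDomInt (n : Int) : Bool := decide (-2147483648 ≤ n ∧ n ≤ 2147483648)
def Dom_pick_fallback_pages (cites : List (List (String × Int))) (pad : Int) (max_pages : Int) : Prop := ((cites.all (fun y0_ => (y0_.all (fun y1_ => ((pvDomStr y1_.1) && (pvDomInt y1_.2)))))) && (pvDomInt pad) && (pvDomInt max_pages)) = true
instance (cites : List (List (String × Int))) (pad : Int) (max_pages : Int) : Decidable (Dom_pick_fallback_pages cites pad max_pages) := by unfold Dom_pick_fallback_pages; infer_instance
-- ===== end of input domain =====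

-- B replaces A's build-all-padded-pages / capped order-preserving-dedup scan by interval merging: the clamped
-- padding windows of the sorted distinct pages are merged into disjoint non-adjacent intervals, which are then
-- enumerated until the cap — no per-page dedup or membership test ever runs.

-- ===== PORT A =====
-- the capped dedup loop of A ('for p in padded: … if len(uniq) >= max_pages: break')
def pvUniqLoop (l : List Int) (uniq : List Int) (max_pages : Int) : List Int :=
  match l with
  | [] => uniq
  | p :: rest =>
    let uniq' := if p ∈ uniq then uniq else uniq ++ [p]
    if max_pages ≤ (uniq'.length : Int) then uniq' else pvUniqLoop rest uniq' max_pages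

-- 'c.get("page")' + the truthiness test 'if c.get("page")' (shared by the two Python sources verbatim)
def pvPage (c : List (String × Int)) : Option Int :=
  match (PySem.Dict.mk c).get? "page" with
  | some p => if p ≠ 0 then some p else none
  | none => none

-- 'range(max(1, p - pad), p + pad + 1)' (A's padding window)
def pvIv (pad p : Int) : List Int := PySem.List.pyRange (max 1 (p - pad)) (p + pad + 1) 1

def pick_fallback_pages (cites : List (List (String × Int))) (pad : Int) (max_pages : Int) : List Int :=
  let pages : List Int := PySem.List.sorted (PySem.Set.ofList (cites.filterMap pvPage)) (fun x => x) false
  let padded : List Int := pages.foldl (fun acc p => acc ++ pvIv pad p) []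
  let uniq := pvUniqLoop padded [] max_pages
  if uniq = [] then [1] else uniq

-- ===== PORT B =====
-- B's merge loop body; the interval list is kept head-first (Python's 'intervals' reversed:
-- 'intervals.append(...)' = cons, 'intervals[-1] = ...' = replace head)
def pvMergeStep (pad : Int) (ivs : List (Int × Int)) (p : Int) : List (Int × Int) :=
  let lo := max 1 (p - pad)
  let hi := p + pad
  if hi < lo then ivs
  else
    match ivs with
    | (l0, h0) :: rest =>
      if lo ≤ h0 + 1 then (l0, max h0 hi) :: rest else (lo, hi) :: (l0, h0) :: rest
    | [] => [(lo, hi)]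

-- B's emission loop ('for lo, hi in intervals: out.extend(range(lo, lo+take)); break at the cap')
def pvEmit (ivs : List (Int × Int)) (out : List Int) (m : Int) : List Int :=
  match ivs with
  | [] => out
  | (lo, hi) :: rest =>
    let t := min (hi - lo + 1) (m - (out.length : Int))
    let out' := out ++ PySem.List.pyRange lo (lo + t) 1
    if m ≤ (out'.length : Int) then out' else pvEmit rest out' m

def pick_fallback_pages_alt (cites : List (List (String × Int))) (pad : Int) (max_pages : Int) : List Int :=
  let pages : List Int := PySem.List.sorted (PySem.Set.ofList (cites.filterMap pvPage)) (fun x => x) false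
  let intervals := (pages.foldl (pvMergeStep pad) []).reverse
  let out := pvEmit intervals [] max_pages
  if out = [] then [1] else out

-- ===== PRECONDITION & SPEC =====
-- Pre_ excludes max_pages ≤ 0, a degenerate cap on which A's single-element result (its break fires only
-- after one append) is an implementation accident; B returns [1] there.
def Pre_pick_fallback_pages (cites : List (List (String × Int))) (pad : Int) (max_pages : Int) : Prop :=
  1 ≤ max_pages

instance (cites : List (List (String × Int))) (pad : Int) (max_pages : Int) : Decidable (Pre_pick_fallback_pages cites pad max_pages) := by unfold Pre_pick_fallback_pages; infer_instance

def pvWitness_pick_fallback_pages : (List (List (String × Int))) × Int × Int := ([[("page", 2)]], 1, 8)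

def Spec_pick_fallback_pages (cites : List (List (String × Int))) (pad : Int) (max_pages : Int) (out : List Int) : Prop := out = pick_fallback_pages_alt cites pad max_pages
instance (cites : List (List (String × Int))) (pad : Int) (max_pages : Int) (out : List Int) : Decidable (Spec_pick_fallback_pages cites pad max_pages out) := by unfold Spec_pick_fallback_pages; infer_instance

-- ===== CLAIM (what is proved, stated in full; the proofs are below) =====
def Claim_equal_pick_fallback_pages : Prop := ∀ (cites : List (List (String × Int))) (pad : Int) (max_pages : Int), Dom_pick_fallback_pages cites pad max_pages → Pre_pick_fallback_pages cites pad max_pages → Spec_pick_fallback_pages cites pad max_pages (pick_fallback_pages cites pad max_pages)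

-- ===== LEMMAS AND PROOFS =====

-- order-preserving dedup relative to an already-seen list (loop-invariant form of A's dedup loop)
def pvDedup (l : List Int) (seen : List Int) : List Int :=
  match l with
  | [] => []
  | p :: rest => if p ∈ seen then pvDedup rest seen else p :: pvDedup rest (seen ++ [p])

theorem pvDedup_sublist (l seen : List Int) : (pvDedup l seen).Sublist l := by
  induction l generalizing seen with
  | nil => simp [pvDedup]
  | cons p rest ih =>
    rw [pvDedup]
    split
    · exact (ih seen).cons p
    · exact (ih (seen ++ [p])).cons₂ p

theorem mem_pvDedup (l : List Int) : ∀ seen x, x ∈ pvDedup l seen ↔ x ∈ l ∧ x ∉ seen := by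
  induction l with
  | nil => simp [pvDedup]
  | cons p rest ih =>
    intro seen x
    by_cases hp : p ∈ seen
    · rw [pvDedup, if_pos hp]
      simp only [ih, List.mem_cons]
      constructor
      · rintro ⟨h1, h2⟩; exact ⟨Or.inr h1, h2⟩
      · rintro ⟨rfl | h1, h2⟩
        · exact absurd hp h2
        · exact ⟨h1, h2⟩
    · rw [pvDedup, if_neg hp]
      simp only [List.mem_cons, ih, List.mem_append]
      by_cases hxp : x = p
      · subst hxp; simp [hp]
      · simp [hxp]

theorem pvDedup_append (a b seen : List Int) :
    pvDedup (a ++ b) seen = pvDedup a seen ++ pvDedup b (seen ++ pvDedup a seen) := by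
  induction a generalizing seen with
  | nil => simp [pvDedup]
  | cons p rest ih =>
    rw [List.cons_append, pvDedup, pvDedup]
    split
    · exact ih seen
    · rw [ih (seen ++ [p])]
      simp [List.append_assoc]

-- A's capped dedup loop computes 'take max_pages' of the relative dedup
theorem pvUniqLoop_eq (l : List Int) : ∀ (uniq : List Int) (m : Int), (uniq.length : Int) < m →
    pvUniqLoop l uniq m = (uniq ++ pvDedup l uniq).take m.toNat := by
  induction l with
  | nil =>
    intro uniq m hm
    rw [pvUniqLoop, pvDedup, List.append_nil]
    exact (List.take_of_length_le (by omega)).symm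
  | cons p rest ih =>
    intro uniq m hm
    rw [pvUniqLoop, pvDedup]
    by_cases hp : p ∈ uniq
    · simp only [if_pos hp]
      rw [if_neg (by omega : ¬ (m ≤ (uniq.length : Int)))]
      exact ih uniq m hm
    · simp only [if_neg hp]
      by_cases hstop : m ≤ ((uniq ++ [p]).length : Int)
      · rw [if_pos hstop]
        have hlen : (uniq ++ [p]).length = m.toNat := by
          simp only [List.length_append, List.length_singleton] at *
          omega
        have hsplit : uniq ++ p :: pvDedup rest (uniq ++ [p]) = (uniq ++ [p]) ++ pvDedup rest (uniq ++ [p]) := by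
          simp [List.append_assoc]
        rw [hsplit, ← hlen, List.take_left]
      · rw [if_neg hstop]
        rw [ih (uniq ++ [p]) m (by simp only [List.length_append, List.length_singleton] at *; omega)]
        congr 1
        simp [List.append_assoc]

-- the dedup of the concatenated padding intervals of a strictly increasing page list is strictly increasing
theorem pvDedup_flatMap_sorted (pad : Int) :
    ∀ (ps : List Int) (qs seen : List Int),
      ps.Pairwise (· < ·) →
      (∀ q ∈ qs, ∀ p ∈ ps, q < p) →
      (∀ x, x ∈ seen ↔ ∃ q ∈ qs, x ∈ pvIv pad q) →
      (pvDedup (ps.flatMap (pvIv pad)) seen).Pairwise (· < ·) := by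
  intro ps
  induction ps with
  | nil => intro qs seen _ _ _; simp [pvDedup]
  | cons p rest ih =>
    intro qs seen hps hqs hseen
    rw [List.flatMap_cons, pvDedup_append]
    have hseen' : ∀ x, (x ∈ seen ++ pvDedup (pvIv pad p) seen) ↔
        ∃ q ∈ qs ++ [p], x ∈ pvIv pad q := by
      intro x
      rw [List.mem_append, mem_pvDedup]
      constructor
      · rintro (hx | ⟨hx, _⟩)
        · rcases (hseen x).mp hx with ⟨q, hq, hxq⟩
          exact ⟨q, List.mem_append.mpr (Or.inl hq), hxq⟩
        · exact ⟨p, List.mem_append.mpr (Or.inr (List.mem_singleton.mpr rfl)), hx⟩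
      · rintro ⟨q, hq, hx⟩
        rcases List.mem_append.mp hq with h | h
        · exact Or.inl ((hseen x).mpr ⟨q, h, hx⟩)
        · by_cases hs : x ∈ seen
          · exact Or.inl hs
          · exact Or.inr ⟨(List.mem_singleton.mp h) ▸ hx, hs⟩
    rw [List.pairwise_append]
    refine ⟨(PySem.List.pairwise_lt_pyRange_one _ _).sublist (pvDedup_sublist _ _), ?_, ?_⟩
    · refine ih (qs ++ [p]) _ (List.pairwise_cons.mp hps).2 ?_ hseen'
      intro q hq p' hp'
      rcases List.mem_append.mp hq with h | h
      · exact hqs q h p' (List.mem_cons_of_mem _ hp')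
      · exact (List.mem_singleton.mp h) ▸ (List.pairwise_cons.mp hps).1 p' hp'
    · intro x hx y hy
      have hx' := (mem_pvDedup _ _ _).mp hx
      have hxr := PySem.List.mem_pyRange_one.mp hx'.1
      have hy' := (mem_pvDedup _ _ _).mp hy
      have hynot : y ∉ pvIv pad p := fun hmem =>
        hy'.2 ((hseen' y).mpr ⟨p, List.mem_append.mpr (Or.inr (List.mem_singleton.mpr rfl)), hmem⟩)
      rcases List.mem_flatMap.mp hy'.1 with ⟨p', hp', hyr⟩
      have hpp' : p < p' := (List.pairwise_cons.mp hps).1 p' hp'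
      have hyr' := PySem.List.mem_pyRange_one.mp hyr
      by_contra hcon
      push_neg at hcon
      apply hynot
      rw [pvIv, PySem.List.mem_pyRange_one]
      unfold pvIv at hyr' hxr
      omega

-- ===== B-side lemmas: interval merging =====

-- flatten a head-first interval list in Python order (reverse, then each interval as a range)
def pvFlat (ivs : List (Int × Int)) : List Int :=
  ivs.reverse.flatMap (fun iv => PySem.List.pyRange iv.1 (iv.2 + 1) 1)

-- gap condition on a head-first interval list: each interval starts past the next one's end + 1
def pvGaps : List (Int × Int) → Prop
  | b :: a :: rest => a.2 + 1 < b.1 ∧ pvGaps (a :: rest)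
  | _ => True

-- well-formed head-first interval list: every interval nonempty, adjacent intervals have a gap
def pvIvsOK (ivs : List (Int × Int)) : Prop :=
  (∀ iv ∈ ivs, iv.1 ≤ iv.2) ∧ pvGaps ivs

-- pvGaps ignores the end of the head interval
theorem pvGaps_replace_head (l h h' : Int) (rest : List (Int × Int)) :
    pvGaps ((l, h) :: rest) → pvGaps ((l, h') :: rest) := by
  match rest with
  | [] => intro _; trivial
  | a :: rest' => exact fun hg => ⟨hg.1, hg.2⟩

theorem pvGaps_tail (iv : Int × Int) (rest : List (Int × Int)) :
    pvGaps (iv :: rest) → pvGaps rest := by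
  match rest with
  | [] => intro _; trivial
  | a :: rest' => exact fun hg => hg.2

theorem mem_pvFlat (ivs : List (Int × Int)) (x : Int) :
    x ∈ pvFlat ivs ↔ ∃ iv ∈ ivs, iv.1 ≤ x ∧ x ≤ iv.2 := by
  unfold pvFlat
  simp only [List.mem_flatMap, List.mem_reverse, PySem.List.mem_pyRange_one]
  constructor
  · rintro ⟨iv, h1, h2, h3⟩; exact ⟨iv, h1, h2, by omega⟩
  · rintro ⟨iv, h1, h2, h3⟩; exact ⟨iv, h1, h2, by omega⟩

-- one merge step: membership
theorem mem_pvFlat_mergeStep (pad : Int) (ivs : List (Int × Int)) (p : Int)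
    (hok : pvIvsOK ivs)
    (hlo : ∀ iv ∈ ivs, iv.1 ≤ max 1 (p - pad)) (x : Int) :
    x ∈ pvFlat (pvMergeStep pad ivs p) ↔ x ∈ pvFlat ivs ∨ x ∈ pvIv pad p := by
  unfold pvMergeStep
  set lo := max 1 (p - pad) with hlodef
  set hi := p + pad with hhidef
  have hmemIv : ∀ y, y ∈ pvIv pad p ↔ lo ≤ y ∧ y ≤ hi := by
    intro y; rw [pvIv, PySem.List.mem_pyRange_one]; constructor <;> (intro h; omega)
  by_cases hemp : hi < lo
  · rw [if_pos hemp]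
    have : x ∉ pvIv pad p := fun h => by have := (hmemIv x).mp h; omega
    simp [this]
  · rw [if_neg hemp]
    match ivs with
    | [] =>
      dsimp only
      simp only [mem_pvFlat, List.mem_singleton, hmemIv]
      constructor
      · rintro ⟨iv, rfl, h⟩; exact Or.inr h
      · rintro (h | h)
        · simp at h
        · exact ⟨(lo, hi), rfl, h⟩
    | (l0, h0) :: rest =>
      dsimp only
      have hl0 : l0 ≤ h0 := hok.1 (l0, h0) List.mem_cons_self
      have hl0lo : l0 ≤ lo := hlo (l0, h0) List.mem_cons_self
      by_cases hmerge : lo ≤ h0 + 1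
      · rw [if_pos hmerge]
        simp only [mem_pvFlat, List.mem_cons, hmemIv]
        constructor
        · rintro ⟨iv, hiv | hiv, h1, h2⟩
          · subst hiv
            simp only at h1 h2
            by_cases hx0 : x ≤ h0
            · exact Or.inl ⟨(l0, h0), Or.inl rfl, h1, hx0⟩
            · right; constructor <;> omega
          · exact Or.inl ⟨iv, Or.inr hiv, h1, h2⟩
        · rintro (⟨iv, hiv | hiv, h1, h2⟩ | ⟨h1, h2⟩)
          · subst hiv
            refine ⟨(l0, max h0 hi), Or.inl rfl, h1, ?_⟩
            simp only at h2 ⊢; omega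
          · exact ⟨iv, Or.inr hiv, h1, h2⟩
          · refine ⟨(l0, max h0 hi), Or.inl rfl, by omega, ?_⟩
            simp only; omega
      · rw [if_neg hmerge]
        simp only [mem_pvFlat, List.mem_cons, hmemIv]
        constructor
        · rintro ⟨iv, hiv | hiv, h1, h2⟩
          · subst hiv; exact Or.inr ⟨h1, h2⟩
          · exact Or.inl ⟨iv, hiv, h1, h2⟩
        · rintro (⟨iv, hiv, h1, h2⟩ | ⟨h1, h2⟩)
          · exact ⟨iv, Or.inr hiv, h1, h2⟩
          · exact ⟨(lo, hi), Or.inl rfl, h1, h2⟩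

-- one merge step: well-formedness
theorem pvIvsOK_mergeStep (pad : Int) (ivs : List (Int × Int)) (p : Int)
    (hok : pvIvsOK ivs) : pvIvsOK (pvMergeStep pad ivs p) := by
  unfold pvMergeStep
  set lo := max 1 (p - pad)
  set hi := p + pad
  by_cases hemp : hi < lo
  · rw [if_pos hemp]; exact hok
  · rw [if_neg hemp]
    match ivs with
    | [] =>
      dsimp only
      refine ⟨?_, trivial⟩
      rintro iv hiv
      rcases List.mem_singleton.mp hiv with rfl
      simpa using (by omega : lo ≤ hi)
    | (l0, h0) :: rest =>
      dsimp only
      have hl0 : l0 ≤ h0 := hok.1 (l0, h0) List.mem_cons_self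
      by_cases hmerge : lo ≤ h0 + 1
      · rw [if_pos hmerge]
        constructor
        · rintro iv hiv
          rcases List.mem_cons.mp hiv with rfl | h
          · simp; omega
          · exact hok.1 iv (List.mem_cons_of_mem _ h)
        · exact pvGaps_replace_head l0 h0 (max h0 hi) rest hok.2
      · rw [if_neg hmerge]
        constructor
        · rintro iv hiv
          rcases List.mem_cons.mp hiv with rfl | h
          · simpa using (by omega : lo ≤ hi)
          · exact hok.1 iv h
        · exact ⟨by omega, hok.2⟩

-- one merge step: every interval start stays ≤ the window start of any later (larger) page
theorem pvLo_mergeStep (pad : Int) (ivs : List (Int × Int)) (p q : Int) (hpq : p ≤ q)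
    (hlo : ∀ iv ∈ ivs, iv.1 ≤ max 1 (p - pad)) :
    ∀ iv ∈ pvMergeStep pad ivs p, iv.1 ≤ max 1 (q - pad) := by
  have hmono : max 1 (p - pad) ≤ max 1 (q - pad) := by omega
  unfold pvMergeStep
  by_cases hemp : p + pad < max 1 (p - pad)
  · rw [if_pos hemp]; intro iv hiv; exact le_trans (hlo iv hiv) hmono
  · rw [if_neg hemp]
    match ivs with
    | [] =>
      dsimp only
      intro iv hiv
      rcases List.mem_singleton.mp hiv with rfl
      simpa using hmono
    | (l0, h0) :: rest =>
      dsimp only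
      by_cases hmerge : max 1 (p - pad) ≤ h0 + 1
      · rw [if_pos hmerge]
        intro iv hiv
        rcases List.mem_cons.mp hiv with rfl | h
        · exact le_trans (hlo (l0, h0) List.mem_cons_self) hmono
        · exact le_trans (hlo iv (List.mem_cons_of_mem _ h)) hmono
      · rw [if_neg hmerge]
        intro iv hiv
        rcases List.mem_cons.mp hiv with rfl | h
        · simpa using hmono
        · exact le_trans (hlo iv h) hmono

-- the whole merge fold: well-formed, starts bounded, membership = union of windows
theorem merge_fold (pad : Int) (ps : List Int) :
    ∀ (acc : List (Int × Int)),
      ps.Pairwise (· < ·) →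
      pvIvsOK acc →
      (∀ iv ∈ acc, ∀ p ∈ ps, iv.1 ≤ max 1 (p - pad)) →
      pvIvsOK (ps.foldl (pvMergeStep pad) acc) ∧
      (∀ x, x ∈ pvFlat (ps.foldl (pvMergeStep pad) acc) ↔
        x ∈ pvFlat acc ∨ ∃ p ∈ ps, x ∈ pvIv pad p) := by
  induction ps with
  | nil => intro acc _ hok _; exact ⟨hok, by simp⟩
  | cons p rest ih =>
    intro acc hps hok hlo
    have hlo1 : ∀ iv ∈ acc, iv.1 ≤ max 1 (p - pad) :=
      fun iv hiv => hlo iv hiv p List.mem_cons_self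
    have hok' := pvIvsOK_mergeStep pad acc p hok
    have hlo' : ∀ iv ∈ pvMergeStep pad acc p, ∀ q ∈ rest, iv.1 ≤ max 1 (q - pad) := by
      intro iv hiv q hq
      exact pvLo_mergeStep pad acc p q
        (le_of_lt ((List.pairwise_cons.mp hps).1 q hq)) hlo1 iv hiv
    rcases ih (pvMergeStep pad acc p) (List.pairwise_cons.mp hps).2 hok' hlo' with ⟨h1, h2⟩
    rw [List.foldl_cons]
    refine ⟨h1, fun x => ?_⟩
    rw [h2 x, mem_pvFlat_mergeStep pad acc p hok hlo1 x]
    simp only [List.mem_cons]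
    constructor
    · rintro ((h | h) | ⟨q, hq, hx⟩)
      · exact Or.inl h
      · exact Or.inr ⟨p, Or.inl rfl, h⟩
      · exact Or.inr ⟨q, Or.inr hq, hx⟩
    · rintro (h | ⟨q, rfl | hq, hx⟩)
      · exact Or.inl (Or.inl h)
      · exact Or.inl (Or.inr hx)
      · exact Or.inr ⟨q, hq, hx⟩

-- the flattening of a well-formed interval list is strictly increasing
theorem pvFlat_pairwise (ivs : List (Int × Int)) (hok : pvIvsOK ivs) :
    (pvFlat ivs).Pairwise (· < ·) ∧ (∀ x ∈ pvFlat ivs, ∀ iv ∈ ivs.head?, x ≤ iv.2) := by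
  induction ivs with
  | nil => simp [pvFlat]
  | cons iv0 rest ih =>
    obtain ⟨l0, h0⟩ := iv0
    have hokr : pvIvsOK rest :=
      ⟨fun iv hiv => hok.1 iv (List.mem_cons_of_mem _ hiv), pvGaps_tail _ _ hok.2⟩
    rcases ih hokr with ⟨hpr, hbr⟩
    have hflat : pvFlat ((l0, h0) :: rest) = pvFlat rest ++ PySem.List.pyRange l0 (h0 + 1) 1 := by
      unfold pvFlat; simp
    have hgap : ∀ x ∈ pvFlat rest, x < l0 := by
      intro x hx
      match rest with
      | [] => simp [pvFlat] at hx
      | iv1 :: rest' =>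
        have hb := hbr x hx iv1 rfl
        have hg : iv1.2 + 1 < l0 := hok.2.1
        omega
    constructor
    · rw [hflat, List.pairwise_append]
      refine ⟨hpr, PySem.List.pairwise_lt_pyRange_one _ _, ?_⟩
      intro x hx y hy
      have := (PySem.List.mem_pyRange_one.mp hy).1
      have := hgap x hx
      omega
    · intro x hx iv hiv
      rcases Option.mem_some_iff.mp hiv  -- iv = (l0, h0)
      rw [hflat, List.mem_append] at hx
      rcases hx with hx | hx
      · have hl0 : l0 ≤ h0 := hok.1 (l0, h0) List.mem_cons_self
        have := hgap x hx; simpa using by omega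
      · have := (PySem.List.mem_pyRange_one.mp hx).2
        simpa using by omega

-- B's emission loop computes 'take m' of the flattened intervals
theorem pvEmit_eq (ivs : List (Int × Int)) :
    ∀ (out : List Int) (m : Int),
      (∀ iv ∈ ivs, iv.1 ≤ iv.2) →
      (out.length : Int) < m →
      pvEmit ivs out m =
        (out ++ ivs.flatMap (fun iv => PySem.List.pyRange iv.1 (iv.2 + 1) 1)).take m.toNat := by
  induction ivs with
  | nil =>
    intro out m _ hm
    rw [pvEmit, List.flatMap_nil, List.append_nil]
    exact (List.take_of_length_le (by omega)).symm
  | cons iv rest ih =>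
    intro out m hne hm
    obtain ⟨lo, hi⟩ := iv
    have hlohi : lo ≤ hi := hne (lo, hi) List.mem_cons_self
    rw [pvEmit]
    set k : Int := m - (out.length : Int) with hk
    have hk1 : 1 ≤ k := by omega
    set t : Int := min (hi - lo + 1) k with ht
    have ht1 : 1 ≤ t := by omega
    have htk : t ≤ k := by omega
    have hsplit : PySem.List.pyRange lo (hi + 1) 1 =
        PySem.List.pyRange lo (lo + t) 1 ++ PySem.List.pyRange (lo + t) (hi + 1) 1 :=
      PySem.List.pyRange_one_append lo (lo + t) (hi + 1) (by omega) (by omega)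
    have hlent : (PySem.List.pyRange lo (lo + t) 1).length = t.toNat := by
      rw [PySem.List.length_pyRange_one]; omega
    by_cases hstop : m ≤ ((out ++ PySem.List.pyRange lo (lo + t) 1).length : Int)
    · rw [if_pos hstop]
      -- the cap binds: t = k
      have htk' : t = k := by
        simp only [List.length_append, hlent] at hstop
        push_cast at hstop
        omega
      rw [List.flatMap_cons, hsplit]
      have hlen_eq : (out ++ PySem.List.pyRange lo (lo + t) 1).length = m.toNat := by
        simp only [List.length_append, hlent]; omega
      rw [show out ++ (PySem.List.pyRange lo (lo + t) 1 ++ PySem.List.pyRange (lo + t) (hi + 1) 1 ++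
            rest.flatMap (fun iv => PySem.List.pyRange iv.1 (iv.2 + 1) 1)) =
          (out ++ PySem.List.pyRange lo (lo + t) 1) ++
            (PySem.List.pyRange (lo + t) (hi + 1) 1 ++
             rest.flatMap (fun iv => PySem.List.pyRange iv.1 (iv.2 + 1) 1)) by simp [List.append_assoc]]
      rw [← hlen_eq, List.take_left]
    · rw [if_neg hstop]
      -- the interval is exhausted: t = hi - lo + 1
      have htint : t = hi - lo + 1 := by
        simp only [List.length_append, hlent] at hstop
        push_cast at hstop
        omega
      have hrange : PySem.List.pyRange lo (lo + t) 1 = PySem.List.pyRange lo (hi + 1) 1 := by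
        rw [htint]; congr 1; omega
      rw [ih (out ++ PySem.List.pyRange lo (lo + t) 1) m
            (fun iv hiv => hne iv (List.mem_cons_of_mem _ hiv))
            (by omega)]
      rw [List.flatMap_cons, hrange]
      congr 1
      simp [List.append_assoc]

-- main equivalence on max_pages ≥ 1
theorem pick_fallback_pages_eq_aux (cites : List (List (String × Int))) (pad : Int) (max_pages : Int)
    (hm : 1 ≤ max_pages) :
    pick_fallback_pages cites pad max_pages = pick_fallback_pages_alt cites pad max_pages := by
  unfold pick_fallback_pages pick_fallback_pages_alt
  set P := cites.filterMap pvPage with hP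
  set pages := PySem.List.sorted (PySem.Set.ofList P) (fun x => x) false with hpages
  have hpairs : pages.Pairwise (· < ·) := PySem.List.sorted_ofList_pairwise_lt P
  have hpadded : pages.foldl (fun acc p => acc ++ pvIv pad p) [] = pages.flatMap (pvIv pad) :=
    (PySem.List.foldl_append_eq_flatMap _ _ []).trans (List.nil_append _)
  set L := pvDedup (pages.flatMap (pvIv pad)) [] with hL
  have hLsorted : L.Pairwise (· < ·) := by
    apply pvDedup_flatMap_sorted pad pages [] []
    · exact hpairs
    · intro q hq; simp at hq
    · intro x; simp
  have hfold := merge_fold pad pages [] hpairs ⟨by simp, trivial⟩ (by simp)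
  have hFL : pvFlat (pages.foldl (pvMergeStep pad) []) = L := by
    have hFp : (pvFlat (pages.foldl (pvMergeStep pad) [])).Pairwise (· < ·) :=
      (pvFlat_pairwise _ hfold.1).1
    have hmem : ∀ x, x ∈ pvFlat (pages.foldl (pvMergeStep pad) []) ↔ x ∈ L := by
      intro x
      rw [(hfold.2 x), hL, mem_pvDedup]
      simp [pvFlat, List.mem_flatMap]
    have hperm : L.Perm (pvFlat (pages.foldl (pvMergeStep pad) [])) :=
      ((List.perm_ext_iff_of_nodup hFp.nodup hLsorted.nodup).mpr hmem).symm
    calc pvFlat (pages.foldl (pvMergeStep pad) [])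
        = PySem.List.sorted (pvFlat (pages.foldl (pvMergeStep pad) [])) (fun x => x) false :=
          (PySem.List.sorted_eq_of_perm_of_pairwise_lt _ _ _ (List.Perm.refl _) hFp).symm
      _ = L := PySem.List.sorted_eq_of_perm_of_pairwise_lt _ _ _ hperm hLsorted
  have hA : pvUniqLoop (pages.foldl (fun acc p => acc ++ pvIv pad p) []) [] max_pages
      = L.take max_pages.toNat := by
    rw [hpadded, pvUniqLoop_eq _ [] max_pages (by simpa using hm)]
    simp [hL]
  have hB : pvEmit (pages.foldl (pvMergeStep pad) []).reverse [] max_pages = L.take max_pages.toNat := by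
    rw [pvEmit_eq (pages.foldl (pvMergeStep pad) []).reverse [] max_pages
          (fun iv hiv => hfold.1.1 iv (List.mem_reverse.mp hiv))
          (by simpa using hm)]
    rw [List.nil_append]
    show (pvFlat (pages.foldl (pvMergeStep pad) [])).take max_pages.toNat = L.take max_pages.toNat
    rw [hFL]
  simp only [hA, hB]

-- ===== VERDICT (by name: the statement is the Claim_ definition above) =====
theorem pick_fallback_pages_spec : Claim_equal_pick_fallback_pages := by
  intro cites pad max_pages _ hpre
  unfold Spec_pick_fallback_pages
  exact pick_fallback_pages_eq_aux cites pad max_pages hpre
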